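-- pv_equiv track=rewrite | github.com/alex-bo/leetcode | a_test1.py | popularNFeatures
-- ===== SOURCE A (Python) =====
-- def popularNFeatures(numFeatures, topFeatures, possibleFeatures,
--                      numFeatureRequests, featureRequests):
--     # save original case-sensitivity for feature names
--     lower2originalFeature = {
--         f.lower(): f for f in possibleFeatures[:numFeatures]
--     }
--     # get needed feature requests and transform to lower for later comparison
--     featureRequests = [r.lower() for r in featureRequests[:numFeatureRequests]]
--     featureMentions = {}
--
--     for feature in lower2originalFeature:
--         # calculate mentions for each feature
--         mentions = getFeatureMentions(feature, featureRequests)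
--         if mentions > 0:
--             featureMentions[feature] = mentions
--
--     # get top features and map them back to original case
--     return [
--         lower2originalFeature[feature]
--         for feature
--         in getTopFeatures(topFeatures, featureMentions)
--     ]
--
-- def getFeatureMentions(feature, featureRequests):
--     count = 0
--     for request in featureRequests:
--         if feature in request:
--             count += 1
--     return count
--
-- def getTopFeatures(num, featureMentions):
--     return [
--         feature
--         for feature, _
--         in sorted(
--             featureMentions.items(),
--             key=lambda i: (i[1], i[0]),
--             reverse=True
--         )[:num]
--     ]
-- ===== SOURCE B (Python) =====
-- def popularNFeatures(numFeatures, topFeatures, possibleFeatures,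
--                      numFeatureRequests, featureRequests):
--     # Multi-pattern substring matching: per request, enumerate one candidate
--     # substring per (start position, distinct feature length) and look it up
--     # in a hash set of features -- no per-feature scan of the requests.
--     prefix = possibleFeatures[:numFeatures]
--     featset = {f.lower() for f in prefix}
--     lengths = sorted({len(f) for f in featset})
--     counts = {}
--     for r in featureRequests[:numFeatureRequests]:
--         rl = r.lower()
--         seen = set()
--         for i in range(len(rl) + 1):
--             for L in lengths:
--                 s = rl[i:i + L]
--                 if s in featset and s not in seen:
--                     seen.add(s)
--                     counts[s] = counts.get(s, 0) + 1
--     ranked = sorted(counts.items(), key=lambda kv: (kv[1], kv[0]), reverse=True)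
--     return [next(g for g in reversed(prefix) if g.lower() == f)
--             for f, _ in ranked[:topFeatures]]
-- ===== Notes on version B (the rewrite author's own statement) =====
-- stated objective: alternative
-- what changed: B replaces A's per-feature containment scan of every request by multi-pattern substring matching: per request it enumerates one candidate substring per (start position, distinct feature length) and looks it up in a hash set of features, deduplicating per request with a seen-set; original case is recovered by a reversed linear search instead of a dict comprehension.
import Mathlib
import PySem

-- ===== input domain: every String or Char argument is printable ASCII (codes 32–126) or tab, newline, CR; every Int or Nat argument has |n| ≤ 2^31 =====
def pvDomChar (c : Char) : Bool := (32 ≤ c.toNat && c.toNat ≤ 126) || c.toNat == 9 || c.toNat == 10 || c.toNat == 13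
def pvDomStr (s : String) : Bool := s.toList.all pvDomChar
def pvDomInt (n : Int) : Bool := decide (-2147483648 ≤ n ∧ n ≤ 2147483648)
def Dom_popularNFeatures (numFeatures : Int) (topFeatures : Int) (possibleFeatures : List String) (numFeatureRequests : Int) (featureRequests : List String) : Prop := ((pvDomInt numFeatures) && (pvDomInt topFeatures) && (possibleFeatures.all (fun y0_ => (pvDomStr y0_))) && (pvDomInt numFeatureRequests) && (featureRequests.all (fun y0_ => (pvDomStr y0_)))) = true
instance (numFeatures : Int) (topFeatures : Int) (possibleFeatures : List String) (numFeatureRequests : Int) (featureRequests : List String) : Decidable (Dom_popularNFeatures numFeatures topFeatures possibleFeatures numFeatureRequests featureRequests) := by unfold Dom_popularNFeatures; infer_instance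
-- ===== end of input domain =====

-- B replaces A's per-feature scan of all requests by multi-pattern substring matching: per request
-- it enumerates one candidate substring per (start position, distinct feature length) and looks it
-- up in a hash set of features, deduplicated per request by a seen-set; a genuinely different
-- matching algorithm, proved to return A's exact value.

-- ===== PORT A =====
-- A: per-feature scan of all requests, dict comprehension for original case, sorted(..., reverse=True).
-- The tuple sort key (count, name) is ported as toLex (count, name.toList): Python tuple/str comparison
-- is lexicographic on code points, which is exactly the Lex order on (Int, List Char).
def pvSortKey (p : String × Int) : Lex (Int × List Char) := toLex (p.2, p.1.toList)

def getFeatureMentions (feature : String) (featureRequests : List String) : Int :=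
  featureRequests.foldl (fun count request =>
    if PySem.Str.isIn feature request then count + 1 else count) 0

def getTopFeatures (num : Int) (featureMentions : PySem.Dict String Int) : List String :=
  (PySem.List.slice (PySem.List.sorted featureMentions.items pvSortKey true) none (some num)).map (·.1)

def popularNFeatures (numFeatures : Int) (topFeatures : Int) (possibleFeatures : List String) (numFeatureRequests : Int) (featureRequests : List String) : List String :=
  let lower2originalFeature : PySem.Dict String String :=
    (PySem.List.slice possibleFeatures none (some numFeatures)).foldl
      (fun d f => d.insert (PySem.Str.lower f) f) PySem.Dict.empty
  let featureRequests' := (PySem.List.slice featureRequests none (some numFeatureRequests)).map PySem.Str.lower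
  let featureMentions : PySem.Dict String Int :=
    lower2originalFeature.keys.foldl
      (fun d feature =>
        let mentions := getFeatureMentions feature featureRequests'
        if mentions > 0 then d.insert feature mentions else d)
      PySem.Dict.empty
  (getTopFeatures topFeatures featureMentions).map
    (fun feature => (lower2originalFeature.get? feature).getD "")

-- ===== PORT B =====
-- B: per request, enumerate the candidate substrings rl[i:i+L] (i a start position, L a distinct
-- feature length) and look each up in the feature set; a per-request 'seen' set makes every matched
-- feature count once per request. Python's `next(g for g in reversed(prefix) if ...)` is ported as
-- find?.getD "" — the generator always finds a match (ranked keys are lowered prefix features), so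
-- the default is never returned.
def popularNFeatures_alt (numFeatures : Int) (topFeatures : Int) (possibleFeatures : List String) (numFeatureRequests : Int) (featureRequests : List String) : List String :=
  let pfx := PySem.List.slice possibleFeatures none (some numFeatures)
  let featset : PySem.Set String := PySem.Set.ofList (pfx.map PySem.Str.lower)
  let lengths : List Int :=
    PySem.List.sorted (PySem.Set.ofList (featset.map PySem.Str.len)) (fun x => x) false
  let counts : PySem.Dict String Int :=
    (PySem.List.slice featureRequests none (some numFeatureRequests)).foldl
      (fun d r =>
        let rl := PySem.Str.lower r
        ((PySem.List.pyRange 0 (PySem.Str.len rl + 1) 1).foldl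
            (fun sd i =>
              lengths.foldl
                (fun (sd : PySem.Set String × PySem.Dict String Int) L =>
                  let s := PySem.Str.slice rl (some i) (some (i + L))
                  if s ∈ featset ∧ ¬ s ∈ sd.1 then (PySem.Set.add sd.1 s, sd.2.modify s 0 (· + 1))
                  else sd)
                sd)
            (([] : PySem.Set String), d)).2)
      PySem.Dict.empty
  let ranked := PySem.List.sorted counts.items pvSortKey true
  (PySem.List.slice ranked none (some topFeatures)).map
    (fun p => (pfx.reverse.find? (fun g => PySem.Str.lower g == p.1)).getD "")

-- ===== PRECONDITION & SPEC =====
def Spec_popularNFeatures (numFeatures : Int) (topFeatures : Int) (possibleFeatures : List String) (numFeatureRequests : Int) (featureRequests : List String) (out : List String) : Prop := out = popularNFeatures_alt numFeatures topFeatures possibleFeatures numFeatureRequests featureRequests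
instance (numFeatures : Int) (topFeatures : Int) (possibleFeatures : List String) (numFeatureRequests : Int) (featureRequests : List String) (out : List String) : Decidable (Spec_popularNFeatures numFeatures topFeatures possibleFeatures numFeatureRequests featureRequests out) := by unfold Spec_popularNFeatures; infer_instance

-- ===== CLAIM (what is proved, stated in full; the proofs are below) =====
def Claim_equal_popularNFeatures : Prop := ∀ (numFeatures : Int) (topFeatures : Int) (possibleFeatures : List String) (numFeatureRequests : Int) (featureRequests : List String), Dom_popularNFeatures numFeatures topFeatures possibleFeatures numFeatureRequests featureRequests → Spec_popularNFeatures numFeatures topFeatures possibleFeatures numFeatureRequests featureRequests (popularNFeatures numFeatures topFeatures possibleFeatures numFeatureRequests featureRequests)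

-- ===== LEMMAS AND PROOFS =====

-- A-side: the per-feature count is a countP
lemma pvGetFeatureMentions_eq (f : String) (R : List String) :
    getFeatureMentions f R = (R.countP (fun r => PySem.Str.isIn f r) : Int) := by
  unfold getFeatureMentions
  rw [PySem.List.foldl_if_add_one]
  exact zero_add _

-- A-side: the featureMentions dict as an items list
lemma pvM_items (feats : List String) (hnd : feats.Nodup) (R : List String) :
    (feats.foldl
        (fun d feature =>
          let mentions := getFeatureMentions feature R
          if mentions > 0 then d.insert feature mentions else d)
        PySem.Dict.empty).items
      = (feats.filter (fun f => decide (0 < getFeatureMentions f R))).map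
          (fun f => (f, getFeatureMentions f R)) := by
  show (feats.foldl
      (fun d feature =>
        if 0 < getFeatureMentions feature R then d.insert feature (getFeatureMentions feature R) else d)
      PySem.Dict.empty).items = _
  have h1 := PySem.List.foldl_ite_eq_foldl_filter
      (p := fun f => 0 < getFeatureMentions f R)
      (f := fun (d : PySem.Dict String Int) f => d.insert f (getFeatureMentions f R))
      feats PySem.Dict.empty
  rw [h1, PySem.Dict.items_foldl_insert_fresh _ (fun f => f) (fun f => getFeatureMentions f R) _
        (by intro a _; simp) (by simpa using hnd.filter _)]
  simp [PySem.Dict.empty]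

-- A-side: lookup in the lower→original dict is a reversed find? over the prefix
lemma pvGet?_foldl_insert (l : List String) (d : PySem.Dict String String) (x : String) :
    (l.foldl (fun d g => d.insert (PySem.Str.lower g) g) d).get? x
      = (l.reverse.find? (fun g => PySem.Str.lower g == x)).or (d.get? x) := by
  induction l generalizing d with
  | nil => simp
  | cons g t ih =>
    rw [List.foldl_cons, ih, List.reverse_cons, List.find?_append, Option.or_assoc]
    congr 1
    rw [PySem.Dict.get?_insert]
    by_cases h : PySem.Str.lower g = x
    · simp [h]
    · simp [h, Ne.symm h]

-- the sort key (count, name) is injective in the name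
lemma pvSortKey_inj_fst {a b : String × Int} (h : pvSortKey a = pvSortKey b) : a.1 = b.1 := by
  unfold pvSortKey at h
  have h2 : ((a.2, a.1.toList) : Int × List Char) = (b.2, b.1.toList) := by
    simpa using congrArg (fun x => ofLex x) h
  exact String.toList_inj.mp (congrArg Prod.snd h2)

-- reverse-sorting two permutations with pairwise-distinct names gives the same list
lemma pvSorted_rev_eq (xs ys : List (String × Int)) (hperm : ys.Perm xs)
    (hnd : (ys.map Prod.fst).Nodup) :
    PySem.List.sorted xs pvSortKey true = PySem.List.sorted ys pvSortKey true := by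
  apply PySem.List.sorted_rev_eq_of_perm_of_pairwise_gt
  · exact (PySem.List.sorted_perm ys pvSortKey true).trans hperm
  · have hle := PySem.List.sorted_pairwise_rev ys pvSortKey
    have hnd2 : ((PySem.List.sorted ys pvSortKey true).map Prod.fst).Nodup :=
      (List.Perm.nodup_iff ((PySem.List.sorted_perm ys pvSortKey true).map Prod.fst)).mpr hnd
    have hne : (PySem.List.sorted ys pvSortKey true).Pairwise (fun a b => a.1 ≠ b.1) :=
      List.pairwise_map.mp hnd2
    refine (hle.and hne).imp ?_
    intro a b hab
    exact lt_of_le_of_ne hab.1 (fun he => hab.2 (pvSortKey_inj_fst he).symm)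

-- B-side: one candidate-substring step of the inner loop
def pvBStep (fs : PySem.Set String) (sd : PySem.Set String × PySem.Dict String Int) (s : String) :
    PySem.Set String × PySem.Dict String Int :=
  if s ∈ fs ∧ ¬ s ∈ sd.1 then (PySem.Set.add sd.1 s, sd.2.modify s 0 (· + 1)) else sd

lemma pvBFold_getD (fs : PySem.Set String) (cs : List String) (seen : PySem.Set String)
    (d : PySem.Dict String Int) (v : String) :
    ((cs.foldl (pvBStep fs) (seen, d)).2).getD v 0
      = d.getD v 0 + (if v ∈ fs ∧ v ∈ cs ∧ ¬ v ∈ seen then (1 : Int) else 0) := by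
  induction cs generalizing seen d with
  | nil => simp
  | cons s t ih =>
    rw [List.foldl_cons]
    by_cases h : s ∈ fs ∧ ¬ s ∈ seen
    · rw [show pvBStep fs (seen, d) s
          = (PySem.Set.add seen s, d.modify s 0 (· + 1)) by simp [pvBStep, h]]
      rw [ih, PySem.Dict.getD_modify]
      by_cases hvs : v = s
      · subst hvs
        simp [h.1, h.2]
      · rw [if_neg hvs]
        congr 1
        refine if_congr ?_ rfl rfl
        simp only [List.mem_cons, PySem.Set.mem_add, hvs, false_or]
        tauto
    · rw [show pvBStep fs (seen, d) s = (seen, d) by simp [pvBStep, h]]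
      rw [ih]
      congr 1
      refine if_congr ?_ rfl rfl
      simp only [List.mem_cons]
      constructor
      · rintro ⟨h1, h2, h3⟩; exact ⟨h1, Or.inr h2, h3⟩
      · rintro ⟨h1, h2 | h2, h3⟩
        · exact absurd ⟨h2 ▸ h1, h2 ▸ h3⟩ h
        · exact ⟨h1, h2, h3⟩

lemma pvBFold_mem_keys (fs : PySem.Set String) (cs : List String) (seen : PySem.Set String)
    (d : PySem.Dict String Int) (v : String) :
    v ∈ ((cs.foldl (pvBStep fs) (seen, d)).2).keys
      ↔ v ∈ d.keys ∨ (v ∈ fs ∧ v ∈ cs ∧ ¬ v ∈ seen) := by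
  induction cs generalizing seen d with
  | nil => simp
  | cons s t ih =>
    rw [List.foldl_cons]
    by_cases h : s ∈ fs ∧ ¬ s ∈ seen
    · rw [show pvBStep fs (seen, d) s
          = (PySem.Set.add seen s, d.modify s 0 (· + 1)) by simp [pvBStep, h]]
      rw [ih, PySem.Dict.keys_modify, PySem.Dict.mem_keys_insert]
      simp only [PySem.Set.mem_add, List.mem_cons]
      by_cases hvs : v = s
      · subst hvs; simp [h.1, h.2]
      · simp only [hvs, false_or]
        tauto
    · rw [show pvBStep fs (seen, d) s = (seen, d) by simp [pvBStep, h]]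
      rw [ih]
      simp only [List.mem_cons]
      constructor
      · rintro (h1 | ⟨h1, h2, h3⟩)
        · exact Or.inl h1
        · exact Or.inr ⟨h1, Or.inr h2, h3⟩
      · rintro (h1 | ⟨h1, h2 | h2, h3⟩)
        · exact Or.inl h1
        · exact absurd ⟨h2 ▸ h1, h2 ▸ h3⟩ h
        · exact Or.inr ⟨h1, h2, h3⟩

lemma pvBFold_keys_nodup (fs : PySem.Set String) (cs : List String) (seen : PySem.Set String)
    (d : PySem.Dict String Int) (h : d.keys.Nodup) :
    ((cs.foldl (pvBStep fs) (seen, d)).2).keys.Nodup := by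
  induction cs generalizing seen d with
  | nil => exact h
  | cons s t ih =>
    rw [List.foldl_cons]
    by_cases hc : s ∈ fs ∧ ¬ s ∈ seen
    · rw [show pvBStep fs (seen, d) s
          = (PySem.Set.add seen s, d.modify s 0 (· + 1)) by simp [pvBStep, hc]]
      exact ih _ _ (by rw [PySem.Dict.keys_modify]; exact PySem.Dict.nodup_keys_insert _ _ _ h)
    · rw [show pvBStep fs (seen, d) s = (seen, d) by simp [pvBStep, hc]]
      exact ih _ _ h

-- the candidate substrings B enumerates for one lowered request
def pvCands (lengths : List Int) (rl : String) : List String :=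
  (PySem.List.pyRange 0 (PySem.Str.len rl + 1) 1).flatMap
    (fun i => lengths.map (fun L => PySem.Str.slice rl (some i) (some (i + L))))

-- B's inner double loop is a fold of pvBStep over the candidate list
lemma pvInner_eq (fs : PySem.Set String) (lengths : List Int) (rl : String)
    (d : PySem.Dict String Int) :
    (PySem.List.pyRange 0 (PySem.Str.len rl + 1) 1).foldl
        (fun sd i =>
          lengths.foldl
            (fun (sd : PySem.Set String × PySem.Dict String Int) L =>
              let s := PySem.Str.slice rl (some i) (some (i + L))
              if s ∈ fs ∧ ¬ s ∈ sd.1 then (PySem.Set.add sd.1 s, sd.2.modify s 0 (· + 1)) else sd)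
            sd)
        (([] : PySem.Set String), d)
      = (pvCands lengths rl).foldl (pvBStep fs) ([], d) := by
  unfold pvCands
  rw [List.foldl_flatMap]
  simp only [List.foldl_map]
  rfl

-- for a feature (its length is enumerated), occurring among the candidates IS occurring in rl
lemma pvMem_cands (lengths : List Int) (hnn : ∀ L ∈ lengths, 0 ≤ L) (rl v : String)
    (hlen : PySem.Str.len v ∈ lengths) :
    v ∈ pvCands lengths rl ↔ PySem.Str.isIn v rl = true := by
  constructor
  · intro hmem
    obtain ⟨i, hi, hv⟩ := List.mem_flatMap.mp hmem
    obtain ⟨L, hL, hvs⟩ := List.mem_map.mp hv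
    have hi0 : 0 ≤ i := (PySem.List.mem_pyRange_one.mp hi).1
    have hL0 : 0 ≤ L := hnn L hL
    rw [PySem.Str.isIn_iff_infix, ← hvs]
    rw [show (PySem.Str.slice rl (some i) (some (i + L))).toList
        = PySem.List.slice rl.toList (some i) (some (i + L)) by
      rw [PySem.Str.toList_slice]; simp]
    rw [PySem.List.slice_toNat rl.toList hi0 (by omega)]
    exact ((List.take_prefix _ _).isInfix).trans ((List.drop_suffix _ _).isInfix)
  · intro hin
    obtain ⟨pre, suf, hw⟩ := PySem.Str.isIn_iff_infix v rl |>.mp hin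
    apply List.mem_flatMap.mpr
    refine ⟨(pre.length : Int), ?_, ?_⟩
    · apply PySem.List.mem_pyRange_one.mpr
      constructor
      · positivity
      · have : pre.length ≤ rl.toList.length := by
          rw [← hw]; simp
        rw [PySem.Str.len_eq]
        omega
    · apply List.mem_map.mpr
      refine ⟨PySem.Str.len v, hlen, ?_⟩
      apply String.toList_inj.mp
      rw [show (PySem.Str.slice rl (some (pre.length : Int))
            (some ((pre.length : Int) + PySem.Str.len v))).toList
          = PySem.List.slice rl.toList (some (pre.length : Int))
            (some ((pre.length : Int) + PySem.Str.len v)) by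
        rw [PySem.Str.toList_slice]; simp]
      rw [PySem.Str.len_eq, PySem.List.slice_natCast_add]
      rw [← hw, List.append_assoc, List.drop_left, List.take_left]

-- one request's effect on the counts: +1 for every feature occurring in it
lemma pvReq_getD (fs : PySem.Set String) (lengths : List Int) (hnn : ∀ L ∈ lengths, 0 ≤ L)
    (hlens : ∀ f ∈ fs, PySem.Str.len f ∈ lengths) (rl : String) (d : PySem.Dict String Int)
    (v : String) :
    (((pvCands lengths rl).foldl (pvBStep fs) ([], d)).2).getD v 0
      = d.getD v 0 + (if v ∈ fs ∧ PySem.Str.isIn v rl = true then (1 : Int) else 0) := by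
  rw [pvBFold_getD]
  congr 1
  refine if_congr ?_ rfl rfl
  constructor
  · rintro ⟨h1, h2, -⟩; exact ⟨h1, (pvMem_cands lengths hnn rl v (hlens v h1)).mp h2⟩
  · rintro ⟨h1, h2⟩
    exact ⟨h1, (pvMem_cands lengths hnn rl v (hlens v h1)).mpr h2, by simp⟩

lemma pvReq_mem_keys (fs : PySem.Set String) (lengths : List Int) (hnn : ∀ L ∈ lengths, 0 ≤ L)
    (hlens : ∀ f ∈ fs, PySem.Str.len f ∈ lengths) (rl : String) (d : PySem.Dict String Int)
    (v : String) :
    v ∈ (((pvCands lengths rl).foldl (pvBStep fs) ([], d)).2).keys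
      ↔ v ∈ d.keys ∨ (v ∈ fs ∧ PySem.Str.isIn v rl = true) := by
  rw [pvBFold_mem_keys]
  apply or_congr Iff.rfl
  constructor
  · rintro ⟨h1, h2, -⟩; exact ⟨h1, (pvMem_cands lengths hnn rl v (hlens v h1)).mp h2⟩
  · rintro ⟨h1, h2⟩
    exact ⟨h1, (pvMem_cands lengths hnn rl v (hlens v h1)).mpr h2, by simp⟩

-- the whole request loop: per-feature totals, key membership, key uniqueness
lemma pvBCounts_getD (fs : PySem.Set String) (lengths : List Int) (hnn : ∀ L ∈ lengths, 0 ≤ L)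
    (hlens : ∀ f ∈ fs, PySem.Str.len f ∈ lengths) (Rs : List String) (d : PySem.Dict String Int)
    (v : String) (hv : v ∈ fs) :
    (Rs.foldl (fun d rl => ((pvCands lengths rl).foldl (pvBStep fs) ([], d)).2) d).getD v 0
      = d.getD v 0 + (Rs.countP (fun rl => PySem.Str.isIn v rl) : Int) := by
  induction Rs generalizing d with
  | nil => simp
  | cons r t ih =>
    rw [List.foldl_cons, ih, pvReq_getD fs lengths hnn hlens r d v, List.countP_cons]
    by_cases h : PySem.Str.isIn v r = true
    · rw [if_pos ⟨hv, h⟩, if_pos h]; push_cast; ring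
    · rw [if_neg (fun hc => h hc.2), if_neg h]; push_cast; ring

lemma pvBCounts_mem_keys (fs : PySem.Set String) (lengths : List Int) (hnn : ∀ L ∈ lengths, 0 ≤ L)
    (hlens : ∀ f ∈ fs, PySem.Str.len f ∈ lengths) (Rs : List String) (d : PySem.Dict String Int)
    (v : String) :
    v ∈ (Rs.foldl (fun d rl => ((pvCands lengths rl).foldl (pvBStep fs) ([], d)).2) d).keys
      ↔ v ∈ d.keys ∨ (v ∈ fs ∧ ∃ rl ∈ Rs, PySem.Str.isIn v rl = true) := by
  induction Rs generalizing d with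
  | nil => simp
  | cons r t ih =>
    rw [List.foldl_cons, ih, pvReq_mem_keys fs lengths hnn hlens r d v]
    simp only [List.mem_cons]
    constructor
    · rintro ((h1 | ⟨h1, h2⟩) | ⟨h1, rl, h2, h3⟩)
      · exact Or.inl h1
      · exact Or.inr ⟨h1, r, Or.inl rfl, h2⟩
      · exact Or.inr ⟨h1, rl, Or.inr h2, h3⟩
    · rintro (h1 | ⟨h1, rl, h2 | h2, h3⟩)
      · exact Or.inl (Or.inl h1)
      · exact Or.inl (Or.inr ⟨h1, h2 ▸ h3⟩)
      · exact Or.inr ⟨h1, rl, h2, h3⟩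

lemma pvBCounts_keys_nodup (fs : PySem.Set String) (lengths : List Int) (Rs : List String)
    (d : PySem.Dict String Int) (h : d.keys.Nodup) :
    (Rs.foldl (fun d rl => ((pvCands lengths rl).foldl (pvBStep fs) ([], d)).2) d).keys.Nodup := by
  induction Rs generalizing d with
  | nil => exact h
  | cons r t ih =>
    rw [List.foldl_cons]
    exact ih _ (pvBFold_keys_nodup fs _ _ _ h)

-- the outer request loop of the B port, rewritten over the lowered requests
lemma pvOuter_eq (fs : PySem.Set String) (lengths : List Int) (l : List String)
    (d0 : PySem.Dict String Int) :
    l.foldl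
      (fun d r =>
        let rl := PySem.Str.lower r
        ((PySem.List.pyRange 0 (PySem.Str.len rl + 1) 1).foldl
            (fun sd i =>
              lengths.foldl
                (fun (sd : PySem.Set String × PySem.Dict String Int) L =>
                  let s := PySem.Str.slice rl (some i) (some (i + L))
                  if s ∈ fs ∧ ¬ s ∈ sd.1 then (PySem.Set.add sd.1 s, sd.2.modify s 0 (· + 1))
                  else sd)
                sd)
            (([] : PySem.Set String), d)).2)
      d0
    = (l.map PySem.Str.lower).foldl
        (fun d rl => ((pvCands lengths rl).foldl (pvBStep fs) ([], d)).2) d0 := by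
  induction l generalizing d0 with
  | nil => simp
  | cons r t ih =>
    rw [List.map_cons, List.foldl_cons, List.foldl_cons, ih]
    exact congrArg
      (fun x => (t.map PySem.Str.lower).foldl
        (fun d rl => ((pvCands lengths rl).foldl (pvBStep fs) ([], d)).2) x)
      (congrArg Prod.snd (pvInner_eq fs lengths (PySem.Str.lower r) d0))

-- ===== VERDICT (by name: the statement is the Claim_ definition above) =====
set_option maxHeartbeats 2000000 in
theorem popularNFeatures_spec : Claim_equal_popularNFeatures := by
  intro numFeatures topFeatures possibleFeatures numFeatureRequests featureRequests _hdom
  unfold Spec_popularNFeatures popularNFeatures popularNFeatures_alt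
  set P := PySem.List.slice possibleFeatures none (some numFeatures) with hP
  set R := (PySem.List.slice featureRequests none (some numFeatureRequests)).map PySem.Str.lower with hR
  set feats : PySem.Set String := PySem.Set.ofList (P.map PySem.Str.lower) with hfeats
  set lengths : List Int :=
    PySem.List.sorted (PySem.Set.ofList (feats.map PySem.Str.len)) (fun x => x) false with hlengths
  -- A's iteration list is exactly feats
  have hkeysL : (P.foldl (fun d f => d.insert (PySem.Str.lower f) f)
      (PySem.Dict.empty : PySem.Dict String String)).keys = feats := by
    rw [PySem.Dict.keys_foldl_insert_key P PySem.Str.lower (fun _ g => g)]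
    simp [PySem.Set.update_nil_left, hfeats, PySem.Dict.empty]
  have hndfeats : feats.Nodup := by rw [hfeats]; exact PySem.Set.nodup_ofList _
  have hnn : ∀ L ∈ lengths, 0 ≤ L := by
    intro L hL
    rw [hlengths, PySem.List.mem_sorted, PySem.Set.mem_ofList] at hL
    obtain ⟨g, -, hg⟩ := List.mem_map.mp hL
    rw [← hg, PySem.Str.len_eq]
    positivity
  have hlens : ∀ f ∈ feats, PySem.Str.len f ∈ lengths := by
    intro f hf
    rw [hlengths, PySem.List.mem_sorted, PySem.Set.mem_ofList]
    exact List.mem_map.mpr ⟨f, hf, rfl⟩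
  -- B's count loop, rewritten as the fold of pvBStep over the candidate lists
  have hBfold : (PySem.List.slice featureRequests none (some numFeatureRequests)).foldl
      (fun d r =>
        let rl := PySem.Str.lower r
        ((PySem.List.pyRange 0 (PySem.Str.len rl + 1) 1).foldl
            (fun sd i =>
              lengths.foldl
                (fun (sd : PySem.Set String × PySem.Dict String Int) L =>
                  let s := PySem.Str.slice rl (some i) (some (i + L))
                  if s ∈ feats ∧ ¬ s ∈ sd.1 then (PySem.Set.add sd.1 s, sd.2.modify s 0 (· + 1))
                  else sd)
                sd)
            (([] : PySem.Set String), d)).2)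
      PySem.Dict.empty
      = R.foldl (fun d rl => ((pvCands lengths rl).foldl (pvBStep feats) ([], d)).2)
          PySem.Dict.empty := by
    rw [pvOuter_eq feats lengths, ← hR]
  set C := R.foldl (fun d rl => ((pvCands lengths rl).foldl (pvBStep feats) ([], d)).2)
      (PySem.Dict.empty : PySem.Dict String Int) with hC
  set M := feats.foldl
      (fun d feature =>
        let mentions := getFeatureMentions feature R
        if mentions > 0 then d.insert feature mentions else d)
      (PySem.Dict.empty : PySem.Dict String Int) with hM
  have hCnd : C.keys.Nodup := pvBCounts_keys_nodup feats lengths R _ (by simp)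
  have hCmem : ∀ v, v ∈ C.keys ↔ v ∈ feats ∧ 0 < getFeatureMentions v R := by
    intro v
    rw [hC, pvBCounts_mem_keys feats lengths hnn hlens, pvGetFeatureMentions_eq]
    simp [List.countP_pos_iff]
  have hMitems : M.items
      = (feats.filter (fun f => decide (0 < getFeatureMentions f R))).map
          (fun f => (f, getFeatureMentions f R)) := pvM_items feats hndfeats R
  -- C.items is a permutation of M.items
  have hCitems : C.items = C.keys.map (fun k => (k, getFeatureMentions k R)) := by
    rw [PySem.Dict.items_eq_map_keys C hCnd 0]
    apply List.map_congr_left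
    intro k hk
    have hkf : k ∈ feats := ((hCmem k).mp hk).1
    rw [hC, pvBCounts_getD feats lengths hnn hlens R _ k hkf, pvGetFeatureMentions_eq]
    simp
  have hkeysPerm : C.keys.Perm (feats.filter (fun f => decide (0 < getFeatureMentions f R))) := by
    rw [List.perm_ext_iff_of_nodup hCnd (hndfeats.filter _)]
    intro v
    rw [hCmem v, List.mem_filter]
    simp
  have hitemsPerm : C.items.Perm M.items := by
    rw [hCitems, hMitems]
    exact hkeysPerm.map _
  have hCfstnd : (C.items.map Prod.fst).Nodup := by
    rw [hCitems, List.map_map,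
      show (Prod.fst ∘ fun k => (k, getFeatureMentions k R)) = id from rfl, List.map_id]
    exact hCnd
  -- the two rankings coincide
  have hsorted : PySem.List.sorted M.items pvSortKey true
      = PySem.List.sorted C.items pvSortKey true :=
    pvSorted_rev_eq M.items C.items hitemsPerm hCfstnd
  -- assemble
  simp only [hBfold, ← hM, hkeysL, ← hfeats, ← hlengths, getTopFeatures, hsorted]
  rw [List.map_map]
  apply List.map_congr_left
  intro p _
  show (_ : Option String).getD "" = _
  rw [pvGet?_foldl_insert]
  have he : (PySem.Dict.empty : PySem.Dict String String).get? p.1 = none := rfl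
  rw [he, Option.or_none]
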